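-- pv_equiv track=rewrite | github.com/vkumar04/python-fitment-api | src/services/wheel_size_lookup.py | _normalize_model
-- ===== SOURCE A (Python) =====
-- def _normalize_model(model: str) -> str:
--     """Normalize model name for URL."""
--     # Remove trim info for base lookup
--     model = model.lower()
--     # Common trim suffixes to strip for base model lookup
--     for suffix in [
--         " miata",  # Mazda MX-5 Miata -> mx-5
--         " sport",
--         " touring",
--         " ex",
--         " lx",
--         " si",
--         " type r",
--         " type-r",
--         " base",
--         " premium",
--         " limited",
--         " se",
--         " sel",
--         " xle",
--         " xse",
--     ]:
--         if model.endswith(suffix):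
--             model = model[: -len(suffix)]
--             break
--     return model.replace(" ", "-").replace("_", "-")
-- ===== SOURCE B (Python) =====
-- _SUFFIX_WORDS = frozenset({
--     "miata", "sport", "touring", "ex", "lx", "si", "type-r",
--     "base", "premium", "limited", "se", "sel", "xle", "xse",
-- })
--
--
-- def _normalize_model(model: str) -> str:
--     """Normalize model name for URL."""
--     model = model.lower()
--     head, sep, last = model.rpartition(" ")
--     if sep:
--         if last in _SUFFIX_WORDS:
--             model = head
--         elif last == "r":
--             head2, sep2, last2 = head.rpartition(" ")
--             if sep2 and last2 == "type":
--                 model = head2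
--     return model.replace(" ", "-").replace("_", "-")
-- ===== Notes on version B (the rewrite author's own statement) =====
-- stated objective: idiomatic
-- what changed: B replaces A's 15-iteration endswith scan (with break) by a single rpartition at the last space plus a set lookup of the last word (with one extra rpartition for the two-word suffix ' type r'), relying on the fact that no trim suffix is a suffix of another.
import Mathlib
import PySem

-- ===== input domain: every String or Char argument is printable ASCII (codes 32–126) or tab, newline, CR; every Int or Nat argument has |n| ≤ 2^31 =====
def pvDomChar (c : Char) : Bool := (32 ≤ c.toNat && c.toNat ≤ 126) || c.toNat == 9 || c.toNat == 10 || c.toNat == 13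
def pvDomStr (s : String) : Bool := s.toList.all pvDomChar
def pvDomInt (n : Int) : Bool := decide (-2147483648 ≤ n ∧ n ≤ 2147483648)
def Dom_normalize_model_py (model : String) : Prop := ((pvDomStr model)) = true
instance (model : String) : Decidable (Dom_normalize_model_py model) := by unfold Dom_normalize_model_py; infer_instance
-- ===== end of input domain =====

set_option maxRecDepth 8192


-- B replaces A's 15-way endswith scan by one rpartition at the last space plus a set lookup of the
-- last word (idiomatic/alternative; same cost — not claimed faster).

-- ===== PORT A =====
-- the trim-suffix list of A, as char lists (string literals ported to List Char)
def pvSuffixesA : List (List Char) :=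
  [[' ','m','i','a','t','a'], [' ','s','p','o','r','t'], [' ','t','o','u','r','i','n','g'],
   [' ','e','x'], [' ','l','x'], [' ','s','i'], [' ','t','y','p','e',' ','r'],
   [' ','t','y','p','e','-','r'], [' ','b','a','s','e'], [' ','p','r','e','m','i','u','m'],
   [' ','l','i','m','i','t','e','d'], [' ','s','e'], [' ','s','e','l'], [' ','x','l','e'],
   [' ','x','s','e']]

-- the for-loop with break: first suffix that matches strips (model[:-len(suffix)]), then stop
def pvStripLoopA : List (List Char) → List Char → List Char
  | [], m => m
  | s :: rest, m =>
    if PySem.Chars.endswith m s then PySem.List.slice m none (some (-(s.length : Int)))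
    else pvStripLoopA rest m

def normalize_model_py (model : String) : String :=
  let m := PySem.Chars.lower model.toList
  let m := pvStripLoopA pvSuffixesA m
  String.ofList (PySem.Chars.replace (PySem.Chars.replace m [' '] ['-']) ['_'] ['-'])

-- ===== PORT B =====
-- hand port of str.rpartition(" ") (single-char separator, exact): none when no space occurs,
-- otherwise some (text before the last space, text after it)
def pvNotSpace (c : Char) : Bool := decide (c ≠ ' ')

def pvRpartSpace (s : List Char) : Option (List Char × List Char) :=
  if s.reverse.dropWhile pvNotSpace = [] then none
  else some ((s.reverse.dropWhile pvNotSpace).tail.reverse, (s.reverse.takeWhile pvNotSpace).reverse)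

-- the frozenset of one-word trim suffixes of Source B
def pvSuffixWords : List (List Char) :=
  [['m','i','a','t','a'], ['s','p','o','r','t'], ['t','o','u','r','i','n','g'],
   ['e','x'], ['l','x'], ['s','i'], ['t','y','p','e','-','r'], ['b','a','s','e'],
   ['p','r','e','m','i','u','m'], ['l','i','m','i','t','e','d'], ['s','e'],
   ['s','e','l'], ['x','l','e'], ['x','s','e']]

-- the inner 'if sep2 and last2 == "type"' of Source B, on the result of the second rpartition
def pvStripB3 (m : List Char) : Option (List Char × List Char) → List Char
  | none => m
  | some (head2, last2) => if last2 = ['t','y','p','e'] then head2 else m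

-- the 'if sep:' body of Source B, on the result of the first rpartition
def pvStripB2 (m : List Char) : Option (List Char × List Char) → List Char
  | none => m
  | some (head, last) =>
    if pvSuffixWords.contains last then head
    else if last = ['r'] then pvStripB3 m (pvRpartSpace head)
    else m

def pvStripB (m : List Char) : List Char := pvStripB2 m (pvRpartSpace m)

def normalize_model_py_alt (model : String) : String :=
  let m := PySem.Chars.lower model.toList
  let m := pvStripB m
  String.ofList (PySem.Chars.replace (PySem.Chars.replace m [' '] ['-']) ['_'] ['-'])

-- ===== PRECONDITION & SPEC =====
def Spec_normalize_model_py (model : String) (out : String) : Prop := out = normalize_model_py_alt model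
instance (model : String) (out : String) : Decidable (Spec_normalize_model_py model out) := by unfold Spec_normalize_model_py; infer_instance

-- ===== CLAIM (what is proved, stated in full; the proofs are below) =====
def Claim_equal_normalize_model_py : Prop := ∀ (model : String), Dom_normalize_model_py model → Spec_normalize_model_py model (normalize_model_py model)

-- ===== LEMMAS AND PROOFS =====

theorem pvNotSpace_iff (c : Char) : pvNotSpace c = true ↔ c ≠ ' ' := by
  simp [pvNotSpace]

theorem pvNotSpace_space : pvNotSpace ' ' = false := by decide

theorem pv_takeWhile_append (v u : List Char) (hv : ∀ c ∈ v, c ≠ ' ') :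
    (v ++ ' ' :: u).takeWhile pvNotSpace = v ∧ (v ++ ' ' :: u).dropWhile pvNotSpace = ' ' :: u := by
  induction v with
  | nil => simp [pvNotSpace_space]
  | cons a v ih =>
    have ha : pvNotSpace a = true := (pvNotSpace_iff a).2 (hv a (by simp))
    have h := ih (fun c hc => hv c (by simp [hc]))
    simp only [List.cons_append, List.takeWhile_cons, List.dropWhile_cons, ha, if_pos, h.1, h.2]
    simp

theorem pv_rpart_append (p w : List Char) (hw : ∀ c ∈ w, c ≠ ' ') :
    pvRpartSpace (p ++ ' ' :: w) = some (p, w) := by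
  have hw' : ∀ c ∈ w.reverse, c ≠ ' ' := fun c hc => hw c (List.mem_reverse.1 hc)
  have h := pv_takeWhile_append w.reverse p.reverse hw'
  have hrev : (p ++ ' ' :: w).reverse = w.reverse ++ ' ' :: p.reverse := by simp
  simp only [pvRpartSpace, hrev, h.1, h.2]
  simp

theorem pv_dropWhile_cons (p : Char → Bool) (xs : List Char) (c : Char) (t : List Char)
    (h : xs.dropWhile p = c :: t) : p c = false ∧ xs = xs.takeWhile p ++ c :: t := by
  constructor
  · induction xs with
    | nil => simp [List.dropWhile] at h
    | cons a xs ih =>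
      by_cases hp : p a
      · exact ih (by simpa [List.dropWhile_cons, hp] using h)
      · simp only [List.dropWhile_cons] at h
        rw [if_neg (by simp [hp])] at h
        cases h
        simpa using hp
  · have h2 := List.takeWhile_append_dropWhile (p := p) (l := xs)
    rw [h] at h2
    exact h2.symm

theorem pv_rpart_some (m h l : List Char) (hm : pvRpartSpace m = some (h, l)) :
    m = h ++ ' ' :: l ∧ ∀ c ∈ l, c ≠ ' ' := by
  unfold pvRpartSpace at hm
  cases hd : m.reverse.dropWhile pvNotSpace with
  | nil => rw [hd] at hm; simp at hm
  | cons c t =>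
    obtain ⟨hc, hsplit⟩ := pv_dropWhile_cons _ _ _ _ hd
    have hc' : c = ' ' := by
      by_contra hne
      rw [(pvNotSpace_iff c).2 hne] at hc
      simp at hc
    rw [hd] at hm
    rw [if_neg (by simp)] at hm
    have hh : h = t.reverse := by
      have := congrArg (fun o => o.map Prod.fst) hm
      simpa using this.symm
    have hl : l = (m.reverse.takeWhile pvNotSpace).reverse := by
      have := congrArg (fun o => o.map Prod.snd) hm
      simpa using this.symm
    constructor
    · have hsp : m.reverse = m.reverse.takeWhile pvNotSpace ++ ' ' :: t := by
        conv_lhs => rw [hsplit]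
        rw [hc']
      calc m = m.reverse.reverse := by simp
        _ = (m.reverse.takeWhile pvNotSpace ++ ' ' :: t).reverse := by conv_lhs => rw [hsp]
        _ = h ++ ' ' :: l := by simp [hh, hl]
    · intro c' hc'
      rw [hl] at hc'
      have := List.mem_takeWhile_imp (List.mem_reverse.1 hc')
      exact (pvNotSpace_iff c').1 this

theorem pv_rpart_none (m : List Char) (hm : pvRpartSpace m = none) : ' ' ∉ m := by
  unfold pvRpartSpace at hm
  by_cases hd : m.reverse.dropWhile pvNotSpace = []
  · intro hmem
    have := (List.dropWhile_eq_nil_iff).1 hd ' ' (List.mem_reverse.2 hmem)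
    rw [pvNotSpace_space] at this
    exact Bool.false_ne_true this
  · rw [if_neg hd] at hm
    exact absurd hm (by simp)

theorem pv_endswith_rpart (m w : List Char) (hw : ∀ c ∈ w, c ≠ ' ')
    (he : PySem.Chars.endswith m (' ' :: w) = true) :
    ∃ p, m = p ++ ' ' :: w ∧ pvRpartSpace m = some (p, w) := by
  obtain ⟨p, hp⟩ := (PySem.Chars.endswith_iff m (' ' :: w)).1 he
  exact ⟨p, hp.symm, by rw [← hp]; exact pv_rpart_append p w hw⟩

theorem pv_endswith_iff (m h l w : List Char) (hr : pvRpartSpace m = some (h, l))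
    (hw : ∀ c ∈ w, c ≠ ' ') :
    PySem.Chars.endswith m (' ' :: w) = true ↔ w = l := by
  constructor
  · intro he
    obtain ⟨p, _, hp2⟩ := pv_endswith_rpart m w hw he
    rw [hp2] at hr
    cases hr
    rfl
  · intro hwl
    subst hwl
    obtain ⟨hm, _⟩ := pv_rpart_some m h w hr
    exact (PySem.Chars.endswith_iff m (' ' :: w)).2 ⟨h, hm.symm⟩

theorem pv_endswith_false (m w : List Char) (hr : pvRpartSpace m = none) (hmem : ' ' ∈ w) :
    ¬ PySem.Chars.endswith m w = true := by
  intro he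
  exact pv_rpart_none m hr (((PySem.Chars.endswith_iff m w).1 he).subset hmem)

theorem pv_slice_strip (p w : List Char) :
    PySem.List.slice (p ++ ' ' :: w) none (some (-(((' ' :: w).length : Nat) : Int))) = p := by
  rw [PySem.List.slice_to_neg_natCast _ _ (by simp)]
  have hlen : (p ++ ' ' :: w).length - (' ' :: w).length = p.length := by simp
  rw [hlen, List.take_left]

theorem pv_endswith_typer (m h l : List Char) (hr : pvRpartSpace m = some (h, l)) :
    PySem.Chars.endswith m [' ','t','y','p','e',' ','r'] = true ↔
      l = ['r'] ∧ PySem.Chars.endswith h [' ','t','y','p','e'] = true := by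
  constructor
  · intro he
    obtain ⟨p, hp⟩ := (PySem.Chars.endswith_iff m _).1 he
    have hm2 : m = (p ++ [' ','t','y','p','e']) ++ ' ' :: ['r'] := by rw [← hp]; simp
    rw [hm2, pv_rpart_append _ _ (by intro c hc; simp at hc; subst hc; decide)] at hr
    cases hr
    refine ⟨rfl, ?_⟩
    exact (PySem.Chars.endswith_iff _ _).2 ⟨p, rfl⟩
  · rintro ⟨hl, he⟩
    obtain ⟨q, hq⟩ := (PySem.Chars.endswith_iff h _).1 he
    obtain ⟨hm, _⟩ := pv_rpart_some m h l hr
    rw [hm, ← hq, hl]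
    exact (PySem.Chars.endswith_iff _ _).2 ⟨q, by simp⟩

theorem pv_stripLoopA_id (m : List Char) (L : List (List Char)) (hr : pvRpartSpace m = none)
    (hL : ∀ s ∈ L, ' ' ∈ s) : pvStripLoopA L m = m := by
  induction L with
  | nil => rfl
  | cons s rest ih =>
    simp only [pvStripLoopA]
    rw [if_neg (pv_endswith_false m s hr (hL s (by simp)))]
    exact ih (fun s' hs' => hL s' (by simp [hs']))

theorem pv_strip_eq (m : List Char) : pvStripLoopA pvSuffixesA m = pvStripB m := by
  cases hr : pvRpartSpace m with
  | none =>
    rw [pv_stripLoopA_id m pvSuffixesA hr (by simp [pvSuffixesA])]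
    simp only [pvStripB, hr, pvStripB2]
  | some pr =>
    obtain ⟨hp, lw⟩ := pr
    obtain ⟨hm, hlns⟩ := pv_rpart_some m hp lw hr
    have E : ∀ w : List Char, (∀ c ∈ w, c ≠ ' ') → (PySem.Chars.endswith m (' ' :: w) = true ↔ w = lw) :=
      fun w hw => pv_endswith_iff m hp lw w hr hw
    simp only [pvSuffixesA, pvStripLoopA, pvStripB, hr, pvStripB2]
    by_cases h1 : lw = ['m','i','a','t','a']
    · subst h1
      rw [if_pos ((E ['m','i','a','t','a'] (by simp)).2 rfl), hm, pv_slice_strip, if_pos (by simp [pvSuffixWords])]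
    by_cases h2 : lw = ['s','p','o','r','t']
    · subst h2
      rw [if_neg (fun hc => absurd ((E ['m','i','a','t','a'] (by simp)).1 hc) (by simp))]
      rw [if_pos ((E ['s','p','o','r','t'] (by simp)).2 rfl), hm, pv_slice_strip, if_pos (by simp [pvSuffixWords])]
    by_cases h3 : lw = ['t','o','u','r','i','n','g']
    · subst h3
      rw [if_neg (fun hc => absurd ((E ['m','i','a','t','a'] (by simp)).1 hc) (by simp))]
      rw [if_neg (fun hc => absurd ((E ['s','p','o','r','t'] (by simp)).1 hc) (by simp))]
      rw [if_pos ((E ['t','o','u','r','i','n','g'] (by simp)).2 rfl), hm, pv_slice_strip, if_pos (by simp [pvSuffixWords])]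
    by_cases h4 : lw = ['e','x']
    · subst h4
      rw [if_neg (fun hc => absurd ((E ['m','i','a','t','a'] (by simp)).1 hc) (by simp))]
      rw [if_neg (fun hc => absurd ((E ['s','p','o','r','t'] (by simp)).1 hc) (by simp))]
      rw [if_neg (fun hc => absurd ((E ['t','o','u','r','i','n','g'] (by simp)).1 hc) (by simp))]
      rw [if_pos ((E ['e','x'] (by simp)).2 rfl), hm, pv_slice_strip, if_pos (by simp [pvSuffixWords])]
    by_cases h5 : lw = ['l','x']
    · subst h5
      rw [if_neg (fun hc => absurd ((E ['m','i','a','t','a'] (by simp)).1 hc) (by simp))]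
      rw [if_neg (fun hc => absurd ((E ['s','p','o','r','t'] (by simp)).1 hc) (by simp))]
      rw [if_neg (fun hc => absurd ((E ['t','o','u','r','i','n','g'] (by simp)).1 hc) (by simp))]
      rw [if_neg (fun hc => absurd ((E ['e','x'] (by simp)).1 hc) (by simp))]
      rw [if_pos ((E ['l','x'] (by simp)).2 rfl), hm, pv_slice_strip, if_pos (by simp [pvSuffixWords])]
    by_cases h6 : lw = ['s','i']
    · subst h6
      rw [if_neg (fun hc => absurd ((E ['m','i','a','t','a'] (by simp)).1 hc) (by simp))]
      rw [if_neg (fun hc => absurd ((E ['s','p','o','r','t'] (by simp)).1 hc) (by simp))]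
      rw [if_neg (fun hc => absurd ((E ['t','o','u','r','i','n','g'] (by simp)).1 hc) (by simp))]
      rw [if_neg (fun hc => absurd ((E ['e','x'] (by simp)).1 hc) (by simp))]
      rw [if_neg (fun hc => absurd ((E ['l','x'] (by simp)).1 hc) (by simp))]
      rw [if_pos ((E ['s','i'] (by simp)).2 rfl), hm, pv_slice_strip, if_pos (by simp [pvSuffixWords])]
    by_cases h7 : lw = ['t','y','p','e','-','r']
    · subst h7
      rw [if_neg (fun hc => absurd ((E ['m','i','a','t','a'] (by simp)).1 hc) (by simp))]
      rw [if_neg (fun hc => absurd ((E ['s','p','o','r','t'] (by simp)).1 hc) (by simp))]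
      rw [if_neg (fun hc => absurd ((E ['t','o','u','r','i','n','g'] (by simp)).1 hc) (by simp))]
      rw [if_neg (fun hc => absurd ((E ['e','x'] (by simp)).1 hc) (by simp))]
      rw [if_neg (fun hc => absurd ((E ['l','x'] (by simp)).1 hc) (by simp))]
      rw [if_neg (fun hc => absurd ((E ['s','i'] (by simp)).1 hc) (by simp))]
      rw [if_neg (fun hc => absurd ((pv_endswith_typer m hp _ hr).1 hc).1 (by simp))]
      rw [if_pos ((E ['t','y','p','e','-','r'] (by simp)).2 rfl), hm, pv_slice_strip, if_pos (by simp [pvSuffixWords])]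
    by_cases h8 : lw = ['b','a','s','e']
    · subst h8
      rw [if_neg (fun hc => absurd ((E ['m','i','a','t','a'] (by simp)).1 hc) (by simp))]
      rw [if_neg (fun hc => absurd ((E ['s','p','o','r','t'] (by simp)).1 hc) (by simp))]
      rw [if_neg (fun hc => absurd ((E ['t','o','u','r','i','n','g'] (by simp)).1 hc) (by simp))]
      rw [if_neg (fun hc => absurd ((E ['e','x'] (by simp)).1 hc) (by simp))]
      rw [if_neg (fun hc => absurd ((E ['l','x'] (by simp)).1 hc) (by simp))]
      rw [if_neg (fun hc => absurd ((E ['s','i'] (by simp)).1 hc) (by simp))]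
      rw [if_neg (fun hc => absurd ((pv_endswith_typer m hp _ hr).1 hc).1 (by simp))]
      rw [if_neg (fun hc => absurd ((E ['t','y','p','e','-','r'] (by simp)).1 hc) (by simp))]
      rw [if_pos ((E ['b','a','s','e'] (by simp)).2 rfl), hm, pv_slice_strip, if_pos (by simp [pvSuffixWords])]
    by_cases h9 : lw = ['p','r','e','m','i','u','m']
    · subst h9
      rw [if_neg (fun hc => absurd ((E ['m','i','a','t','a'] (by simp)).1 hc) (by simp))]
      rw [if_neg (fun hc => absurd ((E ['s','p','o','r','t'] (by simp)).1 hc) (by simp))]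
      rw [if_neg (fun hc => absurd ((E ['t','o','u','r','i','n','g'] (by simp)).1 hc) (by simp))]
      rw [if_neg (fun hc => absurd ((E ['e','x'] (by simp)).1 hc) (by simp))]
      rw [if_neg (fun hc => absurd ((E ['l','x'] (by simp)).1 hc) (by simp))]
      rw [if_neg (fun hc => absurd ((E ['s','i'] (by simp)).1 hc) (by simp))]
      rw [if_neg (fun hc => absurd ((pv_endswith_typer m hp _ hr).1 hc).1 (by simp))]
      rw [if_neg (fun hc => absurd ((E ['t','y','p','e','-','r'] (by simp)).1 hc) (by simp))]
      rw [if_neg (fun hc => absurd ((E ['b','a','s','e'] (by simp)).1 hc) (by simp))]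
      rw [if_pos ((E ['p','r','e','m','i','u','m'] (by simp)).2 rfl), hm, pv_slice_strip, if_pos (by simp [pvSuffixWords])]
    by_cases h10 : lw = ['l','i','m','i','t','e','d']
    · subst h10
      rw [if_neg (fun hc => absurd ((E ['m','i','a','t','a'] (by simp)).1 hc) (by simp))]
      rw [if_neg (fun hc => absurd ((E ['s','p','o','r','t'] (by simp)).1 hc) (by simp))]
      rw [if_neg (fun hc => absurd ((E ['t','o','u','r','i','n','g'] (by simp)).1 hc) (by simp))]
      rw [if_neg (fun hc => absurd ((E ['e','x'] (by simp)).1 hc) (by simp))]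
      rw [if_neg (fun hc => absurd ((E ['l','x'] (by simp)).1 hc) (by simp))]
      rw [if_neg (fun hc => absurd ((E ['s','i'] (by simp)).1 hc) (by simp))]
      rw [if_neg (fun hc => absurd ((pv_endswith_typer m hp _ hr).1 hc).1 (by simp))]
      rw [if_neg (fun hc => absurd ((E ['t','y','p','e','-','r'] (by simp)).1 hc) (by simp))]
      rw [if_neg (fun hc => absurd ((E ['b','a','s','e'] (by simp)).1 hc) (by simp))]
      rw [if_neg (fun hc => absurd ((E ['p','r','e','m','i','u','m'] (by simp)).1 hc) (by simp))]
      rw [if_pos ((E ['l','i','m','i','t','e','d'] (by simp)).2 rfl), hm, pv_slice_strip, if_pos (by simp [pvSuffixWords])]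
    by_cases h11 : lw = ['s','e']
    · subst h11
      rw [if_neg (fun hc => absurd ((E ['m','i','a','t','a'] (by simp)).1 hc) (by simp))]
      rw [if_neg (fun hc => absurd ((E ['s','p','o','r','t'] (by simp)).1 hc) (by simp))]
      rw [if_neg (fun hc => absurd ((E ['t','o','u','r','i','n','g'] (by simp)).1 hc) (by simp))]
      rw [if_neg (fun hc => absurd ((E ['e','x'] (by simp)).1 hc) (by simp))]
      rw [if_neg (fun hc => absurd ((E ['l','x'] (by simp)).1 hc) (by simp))]
      rw [if_neg (fun hc => absurd ((E ['s','i'] (by simp)).1 hc) (by simp))]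
      rw [if_neg (fun hc => absurd ((pv_endswith_typer m hp _ hr).1 hc).1 (by simp))]
      rw [if_neg (fun hc => absurd ((E ['t','y','p','e','-','r'] (by simp)).1 hc) (by simp))]
      rw [if_neg (fun hc => absurd ((E ['b','a','s','e'] (by simp)).1 hc) (by simp))]
      rw [if_neg (fun hc => absurd ((E ['p','r','e','m','i','u','m'] (by simp)).1 hc) (by simp))]
      rw [if_neg (fun hc => absurd ((E ['l','i','m','i','t','e','d'] (by simp)).1 hc) (by simp))]
      rw [if_pos ((E ['s','e'] (by simp)).2 rfl), hm, pv_slice_strip, if_pos (by simp [pvSuffixWords])]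
    by_cases h12 : lw = ['s','e','l']
    · subst h12
      rw [if_neg (fun hc => absurd ((E ['m','i','a','t','a'] (by simp)).1 hc) (by simp))]
      rw [if_neg (fun hc => absurd ((E ['s','p','o','r','t'] (by simp)).1 hc) (by simp))]
      rw [if_neg (fun hc => absurd ((E ['t','o','u','r','i','n','g'] (by simp)).1 hc) (by simp))]
      rw [if_neg (fun hc => absurd ((E ['e','x'] (by simp)).1 hc) (by simp))]
      rw [if_neg (fun hc => absurd ((E ['l','x'] (by simp)).1 hc) (by simp))]
      rw [if_neg (fun hc => absurd ((E ['s','i'] (by simp)).1 hc) (by simp))]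
      rw [if_neg (fun hc => absurd ((pv_endswith_typer m hp _ hr).1 hc).1 (by simp))]
      rw [if_neg (fun hc => absurd ((E ['t','y','p','e','-','r'] (by simp)).1 hc) (by simp))]
      rw [if_neg (fun hc => absurd ((E ['b','a','s','e'] (by simp)).1 hc) (by simp))]
      rw [if_neg (fun hc => absurd ((E ['p','r','e','m','i','u','m'] (by simp)).1 hc) (by simp))]
      rw [if_neg (fun hc => absurd ((E ['l','i','m','i','t','e','d'] (by simp)).1 hc) (by simp))]
      rw [if_neg (fun hc => absurd ((E ['s','e'] (by simp)).1 hc) (by simp))]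
      rw [if_pos ((E ['s','e','l'] (by simp)).2 rfl), hm, pv_slice_strip, if_pos (by simp [pvSuffixWords])]
    by_cases h13 : lw = ['x','l','e']
    · subst h13
      rw [if_neg (fun hc => absurd ((E ['m','i','a','t','a'] (by simp)).1 hc) (by simp))]
      rw [if_neg (fun hc => absurd ((E ['s','p','o','r','t'] (by simp)).1 hc) (by simp))]
      rw [if_neg (fun hc => absurd ((E ['t','o','u','r','i','n','g'] (by simp)).1 hc) (by simp))]
      rw [if_neg (fun hc => absurd ((E ['e','x'] (by simp)).1 hc) (by simp))]
      rw [if_neg (fun hc => absurd ((E ['l','x'] (by simp)).1 hc) (by simp))]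
      rw [if_neg (fun hc => absurd ((E ['s','i'] (by simp)).1 hc) (by simp))]
      rw [if_neg (fun hc => absurd ((pv_endswith_typer m hp _ hr).1 hc).1 (by simp))]
      rw [if_neg (fun hc => absurd ((E ['t','y','p','e','-','r'] (by simp)).1 hc) (by simp))]
      rw [if_neg (fun hc => absurd ((E ['b','a','s','e'] (by simp)).1 hc) (by simp))]
      rw [if_neg (fun hc => absurd ((E ['p','r','e','m','i','u','m'] (by simp)).1 hc) (by simp))]
      rw [if_neg (fun hc => absurd ((E ['l','i','m','i','t','e','d'] (by simp)).1 hc) (by simp))]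
      rw [if_neg (fun hc => absurd ((E ['s','e'] (by simp)).1 hc) (by simp))]
      rw [if_neg (fun hc => absurd ((E ['s','e','l'] (by simp)).1 hc) (by simp))]
      rw [if_pos ((E ['x','l','e'] (by simp)).2 rfl), hm, pv_slice_strip, if_pos (by simp [pvSuffixWords])]
    by_cases h14 : lw = ['x','s','e']
    · subst h14
      rw [if_neg (fun hc => absurd ((E ['m','i','a','t','a'] (by simp)).1 hc) (by simp))]
      rw [if_neg (fun hc => absurd ((E ['s','p','o','r','t'] (by simp)).1 hc) (by simp))]
      rw [if_neg (fun hc => absurd ((E ['t','o','u','r','i','n','g'] (by simp)).1 hc) (by simp))]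
      rw [if_neg (fun hc => absurd ((E ['e','x'] (by simp)).1 hc) (by simp))]
      rw [if_neg (fun hc => absurd ((E ['l','x'] (by simp)).1 hc) (by simp))]
      rw [if_neg (fun hc => absurd ((E ['s','i'] (by simp)).1 hc) (by simp))]
      rw [if_neg (fun hc => absurd ((pv_endswith_typer m hp _ hr).1 hc).1 (by simp))]
      rw [if_neg (fun hc => absurd ((E ['t','y','p','e','-','r'] (by simp)).1 hc) (by simp))]
      rw [if_neg (fun hc => absurd ((E ['b','a','s','e'] (by simp)).1 hc) (by simp))]
      rw [if_neg (fun hc => absurd ((E ['p','r','e','m','i','u','m'] (by simp)).1 hc) (by simp))]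
      rw [if_neg (fun hc => absurd ((E ['l','i','m','i','t','e','d'] (by simp)).1 hc) (by simp))]
      rw [if_neg (fun hc => absurd ((E ['s','e'] (by simp)).1 hc) (by simp))]
      rw [if_neg (fun hc => absurd ((E ['s','e','l'] (by simp)).1 hc) (by simp))]
      rw [if_neg (fun hc => absurd ((E ['x','l','e'] (by simp)).1 hc) (by simp))]
      rw [if_pos ((E ['x','s','e'] (by simp)).2 rfl), hm, pv_slice_strip, if_pos (by simp [pvSuffixWords])]
    by_cases hrc : lw = ['r']
    · subst hrc
      rw [if_neg (fun hc => absurd ((E ['m','i','a','t','a'] (by simp)).1 hc) (by simp))]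
      rw [if_neg (fun hc => absurd ((E ['s','p','o','r','t'] (by simp)).1 hc) (by simp))]
      rw [if_neg (fun hc => absurd ((E ['t','o','u','r','i','n','g'] (by simp)).1 hc) (by simp))]
      rw [if_neg (fun hc => absurd ((E ['e','x'] (by simp)).1 hc) (by simp))]
      rw [if_neg (fun hc => absurd ((E ['l','x'] (by simp)).1 hc) (by simp))]
      rw [if_neg (fun hc => absurd ((E ['s','i'] (by simp)).1 hc) (by simp))]
      cases hr2 : pvRpartSpace hp with
      | none =>
        rw [if_neg (fun hc => pv_rpart_none hp hr2 (((PySem.Chars.endswith_iff hp [' ','t','y','p','e']).1 ((pv_endswith_typer m hp _ hr).1 hc).2).subset (by simp)))]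
        rw [if_neg (fun hc => absurd ((E ['t','y','p','e','-','r'] (by simp)).1 hc) (by simp))]
        rw [if_neg (fun hc => absurd ((E ['b','a','s','e'] (by simp)).1 hc) (by simp))]
        rw [if_neg (fun hc => absurd ((E ['p','r','e','m','i','u','m'] (by simp)).1 hc) (by simp))]
        rw [if_neg (fun hc => absurd ((E ['l','i','m','i','t','e','d'] (by simp)).1 hc) (by simp))]
        rw [if_neg (fun hc => absurd ((E ['s','e'] (by simp)).1 hc) (by simp))]
        rw [if_neg (fun hc => absurd ((E ['s','e','l'] (by simp)).1 hc) (by simp))]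
        rw [if_neg (fun hc => absurd ((E ['x','l','e'] (by simp)).1 hc) (by simp))]
        rw [if_neg (fun hc => absurd ((E ['x','s','e'] (by simp)).1 hc) (by simp))]
        rw [if_neg (show ¬(pvSuffixWords.contains ['r'] = true) by simp [pvSuffixWords]), if_pos (show (['r'] : List Char) = ['r'] from rfl)]
        simp only [pvStripB3]
      | some pr2 =>
        obtain ⟨hp2, lw2⟩ := pr2
        by_cases ht : lw2 = ['t','y','p','e']
        · subst ht
          rw [if_pos ((pv_endswith_typer m hp _ hr).2 ⟨rfl, (pv_endswith_iff hp hp2 _ ['t','y','p','e'] hr2 (by simp)).2 rfl⟩)]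
          have hm2 : m = hp2 ++ [' ','t','y','p','e',' ','r'] := by
            rw [hm, (pv_rpart_some hp hp2 _ hr2).1]
            simp
          rw [hm2, pv_slice_strip]
          rw [if_neg (show ¬(pvSuffixWords.contains ['r'] = true) by simp [pvSuffixWords]), if_pos (show (['r'] : List Char) = ['r'] from rfl)]
          simp [pvStripB3]
        · rw [if_neg (fun hc => ht ((pv_endswith_iff hp hp2 lw2 ['t','y','p','e'] hr2 (by simp)).1 ((pv_endswith_typer m hp _ hr).1 hc).2).symm)]
          rw [if_neg (fun hc => absurd ((E ['t','y','p','e','-','r'] (by simp)).1 hc) (by simp))]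
          rw [if_neg (fun hc => absurd ((E ['b','a','s','e'] (by simp)).1 hc) (by simp))]
          rw [if_neg (fun hc => absurd ((E ['p','r','e','m','i','u','m'] (by simp)).1 hc) (by simp))]
          rw [if_neg (fun hc => absurd ((E ['l','i','m','i','t','e','d'] (by simp)).1 hc) (by simp))]
          rw [if_neg (fun hc => absurd ((E ['s','e'] (by simp)).1 hc) (by simp))]
          rw [if_neg (fun hc => absurd ((E ['s','e','l'] (by simp)).1 hc) (by simp))]
          rw [if_neg (fun hc => absurd ((E ['x','l','e'] (by simp)).1 hc) (by simp))]
          rw [if_neg (fun hc => absurd ((E ['x','s','e'] (by simp)).1 hc) (by simp))]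
          rw [if_neg (show ¬(pvSuffixWords.contains ['r'] = true) by simp [pvSuffixWords]), if_pos (show (['r'] : List Char) = ['r'] from rfl)]
          simp only [pvStripB3]
          rw [if_neg ht]
    · -- lw is no one-word suffix and not 'r': neither side strips
      rw [if_neg (fun hc => h1 (((E ['m','i','a','t','a'] (by simp)).1 hc).symm))]
      rw [if_neg (fun hc => h2 (((E ['s','p','o','r','t'] (by simp)).1 hc).symm))]
      rw [if_neg (fun hc => h3 (((E ['t','o','u','r','i','n','g'] (by simp)).1 hc).symm))]
      rw [if_neg (fun hc => h4 (((E ['e','x'] (by simp)).1 hc).symm))]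
      rw [if_neg (fun hc => h5 (((E ['l','x'] (by simp)).1 hc).symm))]
      rw [if_neg (fun hc => h6 (((E ['s','i'] (by simp)).1 hc).symm))]
      rw [if_neg (fun hc => hrc ((pv_endswith_typer m hp lw hr).1 hc).1)]
      rw [if_neg (fun hc => h7 (((E ['t','y','p','e','-','r'] (by simp)).1 hc).symm))]
      rw [if_neg (fun hc => h8 (((E ['b','a','s','e'] (by simp)).1 hc).symm))]
      rw [if_neg (fun hc => h9 (((E ['p','r','e','m','i','u','m'] (by simp)).1 hc).symm))]
      rw [if_neg (fun hc => h10 (((E ['l','i','m','i','t','e','d'] (by simp)).1 hc).symm))]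
      rw [if_neg (fun hc => h11 (((E ['s','e'] (by simp)).1 hc).symm))]
      rw [if_neg (fun hc => h12 (((E ['s','e','l'] (by simp)).1 hc).symm))]
      rw [if_neg (fun hc => h13 (((E ['x','l','e'] (by simp)).1 hc).symm))]
      rw [if_neg (fun hc => h14 (((E ['x','s','e'] (by simp)).1 hc).symm))]
      rw [if_neg (by simp [pvSuffixWords, h1, h2, h3, h4, h5, h6, h7, h8, h9, h10, h11, h12, h13, h14]), if_neg hrc]

theorem normalize_model_py_eq_alt (model : String) :
    normalize_model_py model = normalize_model_py_alt model := by
  simp only [normalize_model_py, normalize_model_py_alt, pv_strip_eq]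

-- ===== VERDICT (by name: the statement is the Claim_ definition above) =====
theorem normalize_model_py_spec : Claim_equal_normalize_model_py := by
  intro model _
  unfold Spec_normalize_model_py
  exact normalize_model_py_eq_alt model
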